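-- pv_equiv track=rewrite | github.com/sattwik1309/impact-assignment | check_graduation.py | allow
-- ===== SOURCE A (Python) =====
-- def allow(attendance_list):
--     allow = True
--     for i in range(len(attendance_list) - 3):
--         if attendance_list[i] == 0 and attendance_list[i+1] == 0 \
--                 and attendance_list[i+2] == 0 and attendance_list[i+3] == 0:
--             allow = False
--             break
--     return allow
-- ===== SOURCE B (Python) =====
-- def allow(attendance_list):
--     count = 0
--     for x in attendance_list:
--         if x == 0:
--             count += 1
--             if count == 4:
--                 return False
--         else:
--             count = 0
--     return True
-- ===== Notes on version B (the rewrite author's own statement) =====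
-- stated objective: simpler
-- what changed: Replaces the index-based 4-wide window scan with a single direct pass over the elements keeping a running count of consecutive zeros, returning False the moment it reaches 4.
import Mathlib
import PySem

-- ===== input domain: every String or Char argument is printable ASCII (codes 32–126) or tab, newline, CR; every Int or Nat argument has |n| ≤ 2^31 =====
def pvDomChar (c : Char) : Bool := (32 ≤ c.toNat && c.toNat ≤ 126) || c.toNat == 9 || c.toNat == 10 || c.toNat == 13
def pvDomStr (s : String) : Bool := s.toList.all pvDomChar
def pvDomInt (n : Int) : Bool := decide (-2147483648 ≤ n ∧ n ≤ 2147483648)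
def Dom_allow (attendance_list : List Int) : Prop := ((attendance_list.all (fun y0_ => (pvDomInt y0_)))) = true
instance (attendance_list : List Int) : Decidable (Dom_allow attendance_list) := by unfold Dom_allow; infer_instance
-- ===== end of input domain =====

-- B replaces A's index-based 4-wide window scan with a single pass over the
-- elements keeping a running count of consecutive zeros (objective: simpler).

-- ===== PORT A =====
-- 'for i in range(len(xs) - 3)' with break; every index i..i+3 accessed is in
-- range (i + 3 < len), so pyGetD's default is never used.
def allowLoop (xs : List Int) (n i : Nat) : Bool :=
  if i < n then
    if PySem.List.pyGetD xs (i : Int) 0 == 0 && PySem.List.pyGetD xs ((i : Int) + 1) 0 == 0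
        && PySem.List.pyGetD xs ((i : Int) + 2) 0 == 0 && PySem.List.pyGetD xs ((i : Int) + 3) 0 == 0 then
      false
    else
      allowLoop xs n (i + 1)
  else
    true
termination_by n - i

def allow (attendance_list : List Int) : Bool :=
  allowLoop attendance_list (attendance_list.length - 3) 0

-- ===== PORT B =====
def allowAltGo : List Int → Nat → Bool
  | [], _ => true
  | x :: rest, count =>
    if x == 0 then
      if count + 1 == 4 then false else allowAltGo rest (count + 1)
    else
      allowAltGo rest 0

def allow_alt (attendance_list : List Int) : Bool :=
  allowAltGo attendance_list 0

-- ===== PRECONDITION & SPEC =====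
def Spec_allow (attendance_list : List Int) (out : Bool) : Prop := out = allow_alt attendance_list
instance (attendance_list : List Int) (out : Bool) : Decidable (Spec_allow attendance_list out) := by unfold Spec_allow; infer_instance

-- ===== CLAIM (what is proved, stated in full; the proofs are below) =====
def Claim_equal_allow : Prop := ∀ (attendance_list : List Int), Dom_allow attendance_list → Spec_allow attendance_list (allow attendance_list)

-- ===== LEMMAS AND PROOFS =====

-- structural characterization: the list has four consecutive zeros
def hasFour : List Int → Bool
  | a :: b :: c :: d :: rest => (a == 0 && b == 0 && c == 0 && d == 0) || hasFour (b :: c :: d :: rest)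
  | _ => false

-- number of leading zeros
def lz : List Int → Nat
  | [] => 0
  | x :: r => if x = 0 then lz r + 1 else 0

theorem lz_le_length (xs : List Int) : lz xs ≤ xs.length := by
  induction xs with
  | nil => simp [lz]
  | cons x r ih => simp only [lz, List.length_cons]; split <;> omega

theorem hasFour_short (xs : List Int) (h : xs.length < 4) : hasFour xs = false := by
  match xs with
  | [] => rfl
  | [_] => rfl
  | [_, _] => rfl
  | [_, _, _] => rfl
  | _ :: _ :: _ :: _ :: _ => exact absurd h (by simp)

theorem hasFour_cons_zero (r : List Int) : hasFour (0 :: r) = (decide (3 ≤ lz r) || hasFour r) := by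
  match r with
  | [] => rfl
  | [b] =>
    by_cases hb : b = 0 <;> simp [hasFour, lz, hb]
  | [b, c] =>
    by_cases hb : b = 0 <;> by_cases hc : c = 0 <;> simp [hasFour, lz, hb, hc]
  | b :: c :: d :: rest =>
    simp only [hasFour, lz]
    by_cases hb : b = 0 <;> by_cases hc : c = 0 <;> by_cases hd : d = 0 <;>
      simp [hb, hc, hd]

theorem hasFour_cons_ne (x : Int) (r : List Int) (hx : x ≠ 0) : hasFour (x :: r) = hasFour r := by
  match r with
  | [] => simp [hasFour]
  | [_] => simp [hasFour]
  | [_, _] => simp [hasFour]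
  | _ :: _ :: _ :: _ => simp only [hasFour]; simp [hx]

theorem lz4_hasFour (xs : List Int) (h : 4 ≤ lz xs) : hasFour xs = true := by
  match xs with
  | a :: b :: c :: d :: rest =>
    by_cases ha : a = 0 <;> by_cases hb : b = 0 <;> by_cases hc : c = 0 <;>
      by_cases hd : d = 0 <;> simp_all [hasFour, lz]
  | [] => simp [lz] at h
  | [a] => have := lz_le_length [a]; simp at this; omega
  | [a, b] => have := lz_le_length [a, b]; simp at this; omega
  | [a, b, c] => have := lz_le_length [a, b, c]; simp at this; omega

theorem allowAltGo_eq (xs : List Int) : ∀ c, c ≤ 3 →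
    allowAltGo xs c = !(decide (4 - c ≤ lz xs) || hasFour xs) := by
  induction xs with
  | nil => intro c hc; simp [allowAltGo, lz, hasFour]; omega
  | cons x r ih =>
    intro c hc
    by_cases hx : x = 0
    · subst hx
      by_cases h4 : c + 1 = 4
      · have hc3 : c = 3 := by omega
        subst hc3
        have h1 : (1 : Nat) ≤ lz r + 1 := by omega
        simp [allowAltGo, lz, h1]
      · have hstep : allowAltGo (0 :: r) c = allowAltGo r (c + 1) := by
          have hne : ¬ (((c + 1 == 4) : Bool) = true) := by simp; omega
          have hz : (((0 : Int) == 0) : Bool) = true := by decide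
          simp only [allowAltGo, hz, if_true]
          rw [if_neg hne]
        rw [hstep, ih (c + 1) (by omega), hasFour_cons_zero]
        have heq : (decide (4 - (c + 1) ≤ lz r) : Bool)
            = (decide (4 - c ≤ lz r + 1) || decide (3 ≤ lz r)) := by
          by_cases h3 : 3 ≤ lz r <;> by_cases h2 : 4 - (c + 1) ≤ lz r <;>
            simp [h3] <;> omega
        have hlz : lz (0 :: r) = lz r + 1 := by simp [lz]
        rw [hlz, heq, Bool.or_assoc]
    · have hstep : allowAltGo (x :: r) c = allowAltGo r 0 := by simp [allowAltGo, hx]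
      rw [hstep, ih 0 (by omega), hasFour_cons_ne x r hx]
      have h0 : lz (x :: r) = 0 := by simp [lz, hx]
      rw [h0]
      have hdf : decide (4 - c ≤ (0:Nat)) = false := by simp; omega
      rw [hdf]
      by_cases h4 : 4 ≤ lz r
      · simp [lz4_hasFour r h4, h4]
      · simp [h4]

theorem allow_alt_eq (xs : List Int) : allow_alt xs = !hasFour xs := by
  rw [allow_alt, allowAltGo_eq xs 0 (by omega)]
  by_cases h4 : 4 ≤ lz xs
  · simp [lz4_hasFour xs h4, h4]
  · simp [h4]

theorem drop_cons_getElem (xs : List Int) (i : Nat) (h : i < xs.length) :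
    xs.drop i = xs[i] :: xs.drop (i + 1) := List.drop_eq_getElem_cons h

theorem allowLoop_eq (xs : List Int) : ∀ k i, i + k = xs.length - 3 →
    allowLoop xs (xs.length - 3) i = !hasFour (xs.drop i) := by
  intro k
  induction k with
  | zero =>
    intro i hi
    rw [allowLoop, if_neg (by omega)]
    have : (xs.drop i).length < 4 := by simp; omega
    simp [hasFour_short _ this]
  | succ k ih =>
    intro i hi
    have hlt : i < xs.length - 3 := by omega
    have h0 : i < xs.length := by omega
    have h1 : i + 1 < xs.length := by omega
    have h2 : i + 2 < xs.length := by omega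
    have h3 : i + 3 < xs.length := by omega
    rw [allowLoop, if_pos hlt]
    have g0 : PySem.List.pyGetD xs (i : Int) 0 = xs[i] := by
      rw [PySem.List.pyGetD_natCast]; exact List.getD_eq_getElem _ _ h0
    have g1 : PySem.List.pyGetD xs ((i : Int) + 1) 0 = xs[i + 1] := by
      rw [(by push_cast; ring : ((i : Int) + 1) = ((i + 1 : Nat) : Int)), PySem.List.pyGetD_natCast]
      exact List.getD_eq_getElem _ _ h1
    have g2 : PySem.List.pyGetD xs ((i : Int) + 2) 0 = xs[i + 2] := by
      rw [(by push_cast; ring : ((i : Int) + 2) = ((i + 2 : Nat) : Int)), PySem.List.pyGetD_natCast]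
      exact List.getD_eq_getElem _ _ h2
    have g3 : PySem.List.pyGetD xs ((i : Int) + 3) 0 = xs[i + 3] := by
      rw [(by push_cast; ring : ((i : Int) + 3) = ((i + 3 : Nat) : Int)), PySem.List.pyGetD_natCast]
      exact List.getD_eq_getElem _ _ h3
    rw [g0, g1, g2, g3]
    have hdrop : xs.drop i = xs[i] :: xs[i + 1] :: xs[i + 2] :: xs[i + 3] :: xs.drop (i + 4) := by
      rw [drop_cons_getElem xs i h0, drop_cons_getElem xs (i+1) h1,
          drop_cons_getElem xs (i+2) h2, drop_cons_getElem xs (i+3) h3]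
    have hdrop1 : xs.drop (i + 1) = xs[i + 1] :: xs[i + 2] :: xs[i + 3] :: xs.drop (i + 4) := by
      rw [drop_cons_getElem xs (i+1) h1, drop_cons_getElem xs (i+2) h2,
          drop_cons_getElem xs (i+3) h3]
    rw [hdrop]
    simp only [hasFour]
    split
    · next hw => simp [hw]
    · next hw =>
      rw [ih (i + 1) (by omega), hdrop1]
      simp only [Bool.not_or]
      rw [show ((xs[i] == 0 && xs[i+1] == 0 && xs[i+2] == 0 && xs[i+3] == 0) : Bool) = false by
        revert hw; cases h : (xs[i] == 0 && xs[i+1] == 0 && xs[i+2] == 0 && xs[i+3] == 0) <;> simp]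
      simp

-- ===== VERDICT (by name: the statement is the Claim_ definition above) =====
theorem allow_spec : Claim_equal_allow := by
  intro xs _
  unfold Spec_allow allow
  rw [allowLoop_eq xs (xs.length - 3) 0 (by omega), List.drop_zero, allow_alt_eq]
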